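-- pv_equiv track=rewrite | github.com/Natali2411/Robot | draft.py | filtrStr
-- ===== SOURCE A (Python) =====
-- def filtrStr(s):
--     d = {}
--     s2 = ''
--     for i in s:
--         if i not in d:
--             d.setdefault(i, 1)
--         else:
--             d[i] += 1
--             d.update({i: d[i]})
--     for i in d:
--         if d[i] > 1:
--             s2 += i
--     return s2
-- ===== SOURCE B (Python) =====
-- def filtrStr(s):
--     chars = list(s)
--     seen = set()
--     out = []
--     for c in chars:
--         if c not in seen:
--             seen.add(c)
--             if chars.count(c) > 1:
--                 out.append(c)
--     return ''.join(out)
-- ===== Notes on version B (the rewrite author's own statement) =====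
-- stated objective: simpler
-- what changed: B drops A's frequency dictionary and its second output loop: one pass with a seen-set that, at each char's first occurrence, decides membership in the result directly by list.count(c) > 1.
import Mathlib
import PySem

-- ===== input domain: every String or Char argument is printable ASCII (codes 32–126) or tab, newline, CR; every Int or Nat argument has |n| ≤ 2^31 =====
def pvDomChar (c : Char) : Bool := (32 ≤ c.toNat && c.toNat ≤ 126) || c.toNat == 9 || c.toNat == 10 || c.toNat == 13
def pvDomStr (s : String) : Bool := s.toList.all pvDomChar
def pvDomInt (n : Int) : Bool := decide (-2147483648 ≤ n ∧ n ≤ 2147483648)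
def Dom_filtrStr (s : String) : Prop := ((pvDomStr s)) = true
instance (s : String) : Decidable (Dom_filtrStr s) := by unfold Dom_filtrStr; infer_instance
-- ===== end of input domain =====

-- B replaces A's frequency dictionary (and its second loop over the keys) by a single pass
-- with a seen-set, deciding each first-seen char by a direct count scan; same result, simpler code.

-- ===== PORT A =====
def filtrStr (s : String) : String :=
  let d := s.toList.foldl
    (fun (d : PySem.Dict Char Int) i =>
      if d.contains i = false then
        d.setdefault i 1
      else
        -- d[i] += 1; d.update({i: d[i]}) — i is present here, so getD 0 is the exact d[i]
        let d1 := d.insert i (d.getD i 0 + 1)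
        d1.update [(i, d1.getD i 0)])
    PySem.Dict.empty
  -- for i in d: if d[i] > 1: s2 += i   (every iterated i is a key of d, so getD 0 is exact)
  String.mk (d.keys.foldl (fun s2 i => if d.getD i 0 > 1 then s2 ++ [i] else s2) ([] : List Char))

-- ===== PORT B =====
def filtrStr_alt (s : String) : String :=
  let chars := s.toList
  String.mk
    (chars.foldl
      (fun (st : PySem.Set Char × List Char) c =>
        if PySem.Set.contains st.1 c then st
        else (PySem.Set.add st.1 c,
              if PySem.List.count chars c > 1 then st.2 ++ [c] else st.2))
      (PySem.Set.empty, ([] : List Char))).2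

-- ===== PRECONDITION & SPEC =====
def Spec_filtrStr (s : String) (out : String) : Prop := out = filtrStr_alt s
instance (s : String) (out : String) : Decidable (Spec_filtrStr s out) := by unfold Spec_filtrStr; infer_instance

-- ===== CLAIM (what is proved, stated in full; the proofs are below) =====
def Claim_equal_filtrStr : Prop := ∀ (s : String), Dom_filtrStr s → Spec_filtrStr s (filtrStr s)

-- ===== LEMMAS AND PROOFS =====

-- first occurrences of l that are not in seen, in order (proof-only helper)
def fsx : List Char → PySem.Set Char → List Char
  | [], _ => []
  | c :: l, seen => if PySem.Set.contains seen c then fsx l seen else c :: fsx l (seen ++ [c])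

-- A's per-char dict update collapses to the counter step
lemma stepA_eq (d : PySem.Dict Char Int) (i : Char) :
    (if d.contains i = false then
        d.setdefault i 1
      else
        let d1 := d.insert i (d.getD i 0 + 1)
        d1.update [(i, d1.getD i 0)])
    = d.insert i (d.getD i 0 + 1) := by
  by_cases h : d.contains i = true
  · simp only [h, Bool.true_eq_false, if_false]
    simp [PySem.Dict.update, PySem.Dict.getD_insert_self, PySem.Dict.insert_insert_self]
  · have h' : d.contains i = false := by simpa using h
    simp [h', PySem.Dict.setdefault_of_not_contains, PySem.Dict.getD_of_not_contains]

lemma dictA_eq_counter (cs : List Char) :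
    cs.foldl
      (fun (d : PySem.Dict Char Int) i =>
        if d.contains i = false then
          d.setdefault i 1
        else
          let d1 := d.insert i (d.getD i 0 + 1)
          d1.update [(i, d1.getD i 0)])
      PySem.Dict.empty
    = PySem.Dict.counter cs := by
  have hext : ∀ (l : List Char) (d : PySem.Dict Char Int),
      l.foldl
        (fun (d : PySem.Dict Char Int) i =>
          if d.contains i = false then
            d.setdefault i 1
          else
            let d1 := d.insert i (d.getD i 0 + 1)
            d1.update [(i, d1.getD i 0)]) d
      = l.foldl (fun (d : PySem.Dict Char Int) x => d.insert x (d.getD x 0 + 1)) d := by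
    intro l
    induction l with
    | nil => intro d; rfl
    | cons c l ih =>
      intro d
      rw [List.foldl_cons, List.foldl_cons, stepA_eq]
      exact ih _
  rw [hext, PySem.Dict.foldl_insert_getD_add_one_eq_counter]

lemma foldl_add_eq_fsx : ∀ (l : List Char) (seen : PySem.Set Char),
    l.foldl PySem.Set.add seen = seen ++ fsx l seen := by
  intro l
  induction l with
  | nil => intro seen; simp [fsx]
  | cons c l ih =>
    intro seen
    by_cases h : c ∈ seen
    · simp [fsx, h, PySem.Set.add, ih]
    · simp [fsx, h, PySem.Set.add, ih (seen ++ [c])]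

lemma foldl_append_if' (p : Char → Prop) [DecidablePred p] :
    ∀ (l acc : List Char),
      l.foldl (fun acc x => if p x then acc ++ [x] else acc) acc
      = acc ++ l.filter (fun x => decide (p x)) := by
  intro l
  induction l with
  | nil => intro acc; simp
  | cons c l ih =>
    intro acc
    by_cases h : p c
    · simp [h, ih]
    · simp [h, ih]

lemma foldB_snd (m : List Char) : ∀ (l : List Char) (seen : PySem.Set Char) (out : List Char),
    (l.foldl
      (fun (st : PySem.Set Char × List Char) c =>
        if PySem.Set.contains st.1 c then st
        else (PySem.Set.add st.1 c,
              if PySem.List.count m c > 1 then st.2 ++ [c] else st.2))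
      (seen, out)).2
    = out ++ (fsx l seen).filter (fun c => decide (PySem.List.count m c > 1)) := by
  intro l
  induction l with
  | nil => intro seen out; simp [fsx]
  | cons c l ih =>
    intro seen out
    rw [List.foldl_cons]
    dsimp only
    by_cases h : PySem.Set.contains seen c = true
    · have hm : c ∈ seen := by simpa using h
      have hf : fsx (c :: l) seen = fsx l seen := by simp [fsx, hm]
      rw [if_pos h, ih, hf]
    · have hmem : c ∉ seen := by simpa using h
      have hadd : PySem.Set.add seen c = seen ++ [c] := by simp [PySem.Set.add, hmem]
      have hf : fsx (c :: l) seen = c :: fsx l (seen ++ [c]) := by simp [fsx, hmem]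
      rw [if_neg h, ih, hadd, hf]
      by_cases hc : 1 < List.count c m
      · simp [hc]
      · simp [hc]

-- ===== VERDICT (by name: the statement is the Claim_ definition above) =====
theorem filtrStr_spec : Claim_equal_filtrStr := by
  intro s _
  simp only [Spec_filtrStr, filtrStr, filtrStr_alt]
  rw [dictA_eq_counter]
  rw [foldB_snd]
  rw [foldl_append_if' (fun i => (PySem.Dict.counter s.toList).getD i 0 > 1)]
  have hofl : PySem.Set.ofList s.toList = fsx s.toList PySem.Set.empty := by
    rw [PySem.Set.ofList_eq_foldl, foldl_add_eq_fsx]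
    simp [PySem.Set.empty]
  rw [PySem.Dict.keys_counter, hofl]
  simp only [List.nil_append]
  congr 1
  apply List.filter_congr
  intro c _
  simp [PySem.Dict.getD_counter, PySem.List.count_eq]
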